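-- pv_equiv track=rewrite | github.com/RHUDHRESH/Raptorflow_v1 | backend/tools/competitor_analysis_v2.py | _words_conflict
-- ===== SOURCE A (Python) =====
-- def _words_conflict(word1: str, word2: str) -> bool:
--     """Check if two positioning words conflict"""
--     if word1.lower() == word2.lower():
--         return True
--
--     # Check semantic similarity
--     similar_sets = [
--         {"fast", "speed", "quick", "rapid"},
--         {"quality", "premium", "excellence"},
--         {"cheap", "affordable", "budget", "value"},
--         {"safe", "security", "trust", "reliable"}
--     ]
--
--     for similar_set in similar_sets:
--         if word1.lower() in similar_set and word2.lower() in similar_set: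
--             return True
--
--     return False
-- ===== SOURCE B (Python) =====
-- _WORD_GROUP = {}
-- for _i, _group in enumerate([
--     ("fast", "speed", "quick", "rapid"),
--     ("quality", "premium", "excellence"),
--     ("cheap", "affordable", "budget", "value"),
--     ("safe", "security", "trust", "reliable"),
-- ]):
--     for _w in _group:
--         _WORD_GROUP[_w] = _i
--
--
-- def _words_conflict(word1: str, word2: str) -> bool:
--     """Check if two positioning words conflict (group-index lookup instead of a loop over sets)."""
--     w1 = word1.lower()
--     w2 = word2.lower()
--     if w1 == w2:
--         return True
--     g1 = _WORD_GROUP.get(w1)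
--     return g1 is not None and g1 == _WORD_GROUP.get(w2)
-- ===== Notes on version B (the rewrite author's own statement) =====
-- stated objective: idiomatic
-- what changed: Replaces A's loop over four similarity sets (membership-testing both words in each set) with a module-level dict mapping each keyword to its group index, so the body becomes two lookups and an index comparison.
import Mathlib
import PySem

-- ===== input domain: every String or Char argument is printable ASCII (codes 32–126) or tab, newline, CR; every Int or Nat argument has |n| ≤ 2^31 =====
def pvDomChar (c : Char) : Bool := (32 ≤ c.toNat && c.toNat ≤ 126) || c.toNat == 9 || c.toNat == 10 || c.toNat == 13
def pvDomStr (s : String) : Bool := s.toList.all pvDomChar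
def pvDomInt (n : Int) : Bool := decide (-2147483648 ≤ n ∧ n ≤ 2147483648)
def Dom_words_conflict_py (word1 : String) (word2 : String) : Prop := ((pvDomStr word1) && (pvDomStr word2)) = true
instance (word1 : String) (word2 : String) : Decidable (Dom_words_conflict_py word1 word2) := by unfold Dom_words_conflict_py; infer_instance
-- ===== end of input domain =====

-- B replaces A's loop over four similarity sets by a single word→group-index dict lookup (idiomatic; same cost on these fixed tiny sets).

-- ===== PORT A =====
def wcSimilarSets : List (PySem.Set String) :=
  [PySem.Set.ofList ["fast", "speed", "quick", "rapid"],
   PySem.Set.ofList ["quality", "premium", "excellence"],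
   PySem.Set.ofList ["cheap", "affordable", "budget", "value"],
   PySem.Set.ofList ["safe", "security", "trust", "reliable"]]

-- the 'for similar_set in similar_sets: if …: return True' loop is the List.any of its body
def words_conflict_py (word1 : String) (word2 : String) : Bool :=
  if PySem.Str.lower word1 == PySem.Str.lower word2 then true
  else
    wcSimilarSets.any (fun s =>
      PySem.Set.contains s (PySem.Str.lower word1) && PySem.Set.contains s (PySem.Str.lower word2))

-- ===== PORT B =====
-- module-level _WORD_GROUP: the nested for-loops over enumerate(groups) as nested folds of Dict.insert
def wcWordGroup : PySem.Dict String Int :=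
  (PySem.List.enumerate
    [["fast", "speed", "quick", "rapid"],
     ["quality", "premium", "excellence"],
     ["cheap", "affordable", "budget", "value"],
     ["safe", "security", "trust", "reliable"]]).foldl
    (fun d p => p.2.foldl (fun d w => d.insert w p.1) d) PySem.Dict.empty

def words_conflict_py_alt (word1 : String) (word2 : String) : Bool :=
  let w1 := PySem.Str.lower word1
  let w2 := PySem.Str.lower word2
  if w1 == w2 then true
  else
    -- 'g1 is not None and g1 == _WORD_GROUP.get(w2)'
    match wcWordGroup.get? w1 with
    | none => false
    | some g1 => some g1 == wcWordGroup.get? w2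

-- ===== PRECONDITION & SPEC =====
def Spec_words_conflict_py (word1 : String) (word2 : String) (out : Bool) : Prop := out = words_conflict_py_alt word1 word2
instance (word1 : String) (word2 : String) (out : Bool) : Decidable (Spec_words_conflict_py word1 word2 out) := by unfold Spec_words_conflict_py; infer_instance

-- ===== CLAIM (what is proved, stated in full; the proofs are below) =====
def Claim_equal_words_conflict_py : Prop := ∀ (word1 : String) (word2 : String), Dom_words_conflict_py word1 word2 → Spec_words_conflict_py word1 word2 (words_conflict_py word1 word2)

-- ===== LEMMAS AND PROOFS =====

-- the 15 keywords, in insertion order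
def wcAllWords : List String :=
  ["fast", "speed", "quick", "rapid", "quality", "premium", "excellence",
   "cheap", "affordable", "budget", "value", "safe", "security", "trust", "reliable"]

lemma grp_none {L : String} (h : L ∉ wcAllWords) : wcWordGroup.get? L = none := by
  have hG : wcWordGroup = PySem.Dict.mk
      [("fast", (0:Int)), ("speed", 0), ("quick", 0), ("rapid", 0),
       ("quality", 1), ("premium", 1), ("excellence", 1),
       ("cheap", 2), ("affordable", 2), ("budget", 2), ("value", 2),
       ("safe", 3), ("security", 3), ("trust", 3), ("reliable", 3)] := by rfl
  simp only [wcAllWords, List.mem_cons, not_or] at h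
  obtain ⟨n1, n2, n3, n4, n5, n6, n7, n8, n9, n10, n11, n12, n13, n14, n15⟩ := h
  have f1 : ("fast" == L) = false := beq_eq_false_iff_ne.mpr (fun e => n1 e.symm)
  have f2 : ("speed" == L) = false := beq_eq_false_iff_ne.mpr (fun e => n2 e.symm)
  have f3 : ("quick" == L) = false := beq_eq_false_iff_ne.mpr (fun e => n3 e.symm)
  have f4 : ("rapid" == L) = false := beq_eq_false_iff_ne.mpr (fun e => n4 e.symm)
  have f5 : ("quality" == L) = false := beq_eq_false_iff_ne.mpr (fun e => n5 e.symm)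
  have f6 : ("premium" == L) = false := beq_eq_false_iff_ne.mpr (fun e => n6 e.symm)
  have f7 : ("excellence" == L) = false := beq_eq_false_iff_ne.mpr (fun e => n7 e.symm)
  have f8 : ("cheap" == L) = false := beq_eq_false_iff_ne.mpr (fun e => n8 e.symm)
  have f9 : ("affordable" == L) = false := beq_eq_false_iff_ne.mpr (fun e => n9 e.symm)
  have f10 : ("budget" == L) = false := beq_eq_false_iff_ne.mpr (fun e => n10 e.symm)
  have f11 : ("value" == L) = false := beq_eq_false_iff_ne.mpr (fun e => n11 e.symm)
  have f12 : ("safe" == L) = false := beq_eq_false_iff_ne.mpr (fun e => n12 e.symm)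
  have f13 : ("security" == L) = false := beq_eq_false_iff_ne.mpr (fun e => n13 e.symm)
  have f14 : ("trust" == L) = false := beq_eq_false_iff_ne.mpr (fun e => n14 e.symm)
  have f15 : ("reliable" == L) = false := beq_eq_false_iff_ne.mpr (fun e => n15.1 e.symm)
  rw [hG]
  simp only [PySem.Dict.get?, List.find?, f1, f2, f3, f4, f5, f6, f7, f8, f9, f10, f11, f12,
    f13, f14, f15, Option.map_none]

set_option maxRecDepth 4096 in
lemma contains_false {L : String} (h : L ∉ wcAllWords) :
    PySem.Set.contains (PySem.Set.ofList ["fast", "speed", "quick", "rapid"]) L = false ∧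
    PySem.Set.contains (PySem.Set.ofList ["quality", "premium", "excellence"]) L = false ∧
    PySem.Set.contains (PySem.Set.ofList ["cheap", "affordable", "budget", "value"]) L = false ∧
    PySem.Set.contains (PySem.Set.ofList ["safe", "security", "trust", "reliable"]) L = false := by
  simp only [wcAllWords, List.mem_cons, not_or] at h
  have e1 : PySem.Set.ofList ["fast", "speed", "quick", "rapid"] = ["fast", "speed", "quick", "rapid"] := by rfl
  have e2 : PySem.Set.ofList ["quality", "premium", "excellence"] = ["quality", "premium", "excellence"] := by rfl
  have e3 : PySem.Set.ofList ["cheap", "affordable", "budget", "value"] = ["cheap", "affordable", "budget", "value"] := by rfl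
  have e4 : PySem.Set.ofList ["safe", "security", "trust", "reliable"] = ["safe", "security", "trust", "reliable"] := by rfl
  obtain ⟨n1, n2, n3, n4, n5, n6, n7, n8, n9, n10, n11, n12, n13, n14, n15⟩ := h
  refine ⟨?_, ?_, ?_, ?_⟩ <;>
    simp [PySem.Set.contains, e1, e2, e3, e4, List.contains_eq_mem,
      n1, n2, n3, n4, n5, n6, n7, n8, n9, n10, n11, n12, n13, n14, n15]

lemma wc_key (L1 L2 : String) :
    (wcSimilarSets.any (fun s => PySem.Set.contains s L1 && PySem.Set.contains s L2))
    = (match wcWordGroup.get? L1 with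
       | none => false
       | some g1 => some g1 == wcWordGroup.get? L2) := by
  by_cases h1 : L1 ∈ wcAllWords
  · by_cases h2 : L2 ∈ wcAllWords
    · fin_cases h1 <;> fin_cases h2 <;> decide
    · rw [grp_none h2]
      have hb : (match wcWordGroup.get? L1 with
          | none => false
          | some g1 => some g1 == (none : Option Int)) = false := by
        cases wcWordGroup.get? L1 <;> rfl
      rw [hb]
      obtain ⟨c1, c2, c3, c4⟩ := contains_false h2
      simp only [wcSimilarSets, List.any_cons, List.any_nil, c1, c2, c3, c4,
        Bool.and_false, Bool.or_self]
  · rw [grp_none h1]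
    obtain ⟨c1, c2, c3, c4⟩ := contains_false h1
    simp only [wcSimilarSets, List.any_cons, List.any_nil, c1, c2, c3, c4,
      Bool.false_and, Bool.or_self]

-- ===== VERDICT (by name: the statement is the Claim_ definition above) =====
theorem words_conflict_py_spec : Claim_equal_words_conflict_py := by
  intro word1 word2 _
  unfold Spec_words_conflict_py words_conflict_py words_conflict_py_alt
  by_cases e : PySem.Str.lower word1 = PySem.Str.lower word2
  · simp [e]
  · simp only [beq_iff_eq, e, if_false]
    exact wc_key _ _
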